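-- pv_equiv track=rewrite | github.com/neosizzle/gomoku | backend/example/static_eval_example/main.py | generate_diag_indices
-- ===== SOURCE A (Python) =====
-- def generate_diag_indices(board_size):
-- 	diag_indices = []
-- 	combs = board_size + (board_size - 1)
-- 	counter = 1
-- 	direction_up = True
-- 	for i in range(combs):
-- 		# start case, the first elem is always 0
-- 		if i == 0:
-- 			diag_indices.append([0])
-- 			counter += 1
-- 			continue
--
-- 		smallest_elem = 0
-- 		# if direction is up, take the smallest of the last elemnt, else  2nd smallest
-- 		if direction_up:
-- 			smallest_elem = diag_indices[i - 1][0] + 1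
-- 		else:
-- 			smallest_elem = diag_indices[i - 1][1] + 1
--
-- 		# iterate through counter and append alements
-- 		buffer = []
-- 		for i in range(counter):
-- 			buffer.append(smallest_elem + (i * (board_size - 1)))
-- 		diag_indices.append(buffer)
--
-- 		# if direction is up, check for peak and increment counter. If peak reached, change direction and decrement counter
-- 		if direction_up:
-- 			if counter == board_size:
-- 				counter -= 1
-- 				direction_up = False
-- 			else:
-- 				counter += 1
--
-- 		# if direction is down, decrem counter
-- 		else:
-- 			counter -= 1
-- 	return diag_indices
-- ===== SOURCE B (Python) =====
-- def generate_diag_indices(board_size):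
--     n = board_size
--     return [[r * n + (d - r) for r in range(max(0, d - n + 1), min(d, n - 1) + 1)]
--             for d in range(2 * n - 1)]
-- ===== Notes on version B (the rewrite author's own statement) =====
-- stated objective: simpler
-- what changed: Replaces A's stateful counter/direction loop that derives each anti-diagonal from the previous one's stored values with a closed-form double comprehension computing each diagonal d independently (indices r*n+(d-r) for r in the closed-form range).
import Mathlib
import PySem

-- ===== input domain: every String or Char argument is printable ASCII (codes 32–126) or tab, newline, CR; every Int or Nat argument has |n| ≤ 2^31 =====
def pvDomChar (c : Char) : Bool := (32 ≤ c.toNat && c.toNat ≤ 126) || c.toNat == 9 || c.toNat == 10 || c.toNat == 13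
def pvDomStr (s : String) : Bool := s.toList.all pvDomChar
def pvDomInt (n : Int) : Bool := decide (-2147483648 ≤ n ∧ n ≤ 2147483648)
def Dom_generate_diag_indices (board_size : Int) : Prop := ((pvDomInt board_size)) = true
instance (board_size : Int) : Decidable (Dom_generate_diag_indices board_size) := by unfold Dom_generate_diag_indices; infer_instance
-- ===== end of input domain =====

-- B replaces A's stateful counter/direction loop with a closed-form per-diagonal comprehension (objective: simpler).

-- ===== PORT A =====
-- one iteration of A's main loop; state = (diag_indices, counter, direction_up).
-- Python list indexing diag[i-1], prev[0], prev[1] is always in range when A runs, so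
-- pyGetD's default is never used (exact).
def pvStepA (board_size : Int) (st : List (List Int) × Int × Bool) (i : Int) :
    List (List Int) × Int × Bool :=
  let (diag, counter, direction_up) := st
  if i = 0 then (diag ++ [[0]], counter + 1, direction_up)
  else
    let prev := PySem.List.pyGetD diag (i - 1) []
    let smallest_elem :=
      if direction_up then PySem.List.pyGetD prev 0 0 + 1
      else PySem.List.pyGetD prev 1 0 + 1
    let buffer := (PySem.List.pyRange 0 counter 1).foldl
      (fun b j => b ++ [smallest_elem + j * (board_size - 1)]) []
    let diag := diag ++ [buffer]
    if direction_up then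
      if counter = board_size then (diag, counter - 1, false)
      else (diag, counter + 1, direction_up)
    else (diag, counter - 1, direction_up)

def generate_diag_indices (board_size : Int) : List (List Int) :=
  -- combs = board_size + (board_size - 1), inlined
  ((PySem.List.pyRange 0 (board_size + (board_size - 1)) 1).foldl (pvStepA board_size) ([], 1, true)).1

-- ===== PORT B =====
def generate_diag_indices_alt (board_size : Int) : List (List Int) :=
  (PySem.List.pyRange 0 (2 * board_size - 1) 1).map (fun d =>
    (PySem.List.pyRange (max 0 (d - board_size + 1)) (min d (board_size - 1) + 1) 1).map
      (fun r => r * board_size + (d - r)))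

-- ===== PRECONDITION & SPEC =====
def Spec_generate_diag_indices (board_size : Int) (out : List (List Int)) : Prop := out = generate_diag_indices_alt board_size
instance (board_size : Int) (out : List (List Int)) : Decidable (Spec_generate_diag_indices board_size out) := by unfold Spec_generate_diag_indices; infer_instance

-- ===== CLAIM (what is proved, stated in full; the proofs are below) =====
def Claim_equal_generate_diag_indices : Prop := ∀ (board_size : Int), Dom_generate_diag_indices board_size → Spec_generate_diag_indices board_size (generate_diag_indices board_size)

-- ===== LEMMAS AND PROOFS =====

-- diagonal d of B, as a named function
def pvDiagB (n d : Int) : List Int :=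
  (PySem.List.pyRange (max 0 (d - n + 1)) (min d (n - 1) + 1) 1).map
    (fun r => r * n + (d - r))

theorem pvAlt_eq (n : Int) :
    generate_diag_indices_alt n = (PySem.List.pyRange 0 (2 * n - 1) 1).map (pvDiagB n) := rfl

-- A's counter after k iterations (for 2 ≤ n, 1 ≤ k ≤ 2n-1)
def pvCs (n k : Int) : Int := if k ≤ n - 1 then k + 1 else 2 * n - 1 - k

theorem pvDiagB_up (n d : Int) (h : d ≤ n - 1) :
    pvDiagB n d = (PySem.List.pyRange 0 (d + 1) 1).map (fun r => r * n + (d - r)) := by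
  unfold pvDiagB
  rw [max_eq_left (by omega : d - n + 1 ≤ 0), min_eq_left (by omega : d ≤ n - 1)]

theorem pvDiagB_down (n d : Int) (h : n - 1 ≤ d) :
    pvDiagB n d = (PySem.List.pyRange (d - n + 1) n 1).map (fun r => r * n + (d - r)) := by
  unfold pvDiagB
  rw [max_eq_right (by omega : (0:Int) ≤ d - n + 1), min_eq_right (by omega : n - 1 ≤ d)]
  norm_num

theorem pv_foldl_append_map (f : Int → Int) (l : List Int) (acc : List Int) :
    l.foldl (fun b j => b ++ [f j]) acc = acc ++ l.map f := by
  induction l generalizing acc with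
  | nil => simp
  | cons x xs ih => simp [List.foldl_cons, ih]

theorem pv_inv (n : Int) (hn : 2 ≤ n) :
    ∀ k : Int, 1 ≤ k → k ≤ 2 * n - 1 →
      (PySem.List.pyRange 0 k 1).foldl (pvStepA n) ([], 1, true)
        = ((PySem.List.pyRange 0 k 1).map (pvDiagB n), pvCs n k, decide (k ≤ n - 1)) := by
  intro k hk
  induction k, hk using Int.le_induction with
  | base =>
    intro _
    have h1 : PySem.List.pyRange 0 (1:Int) 1 = [0] := by
      simpa using PySem.List.pyRange_one_singleton (a := (0:Int))
    have hd : pvDiagB n 0 = [0] := by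
      rw [pvDiagB_up n 0 (by omega), show (0:Int) + 1 = 1 from rfl, h1]
      simp
    rw [h1]
    simp [pvStepA, hd, pvCs, show (1:Int) ≤ n - 1 from by omega]
  | succ k hk1 ih =>
    intro hk2
    have ihh := ih (by omega)
    rw [PySem.List.pyRange_one_succ_right (by omega : (0:Int) ≤ k), List.foldl_append,
      List.map_append, ihh]
    simp only [List.foldl_cons, List.foldl_nil, List.map_cons, List.map_nil]
    have hprev : PySem.List.pyGetD ((PySem.List.pyRange 0 k 1).map (pvDiagB n)) (k - 1) []
        = pvDiagB n (k - 1) :=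
      PySem.List.pyGetD_map_pyRange_of_nonneg _ _ _ _ (by omega) (by omega)
    by_cases hup : k ≤ n - 1
    · -- direction up: smallest = diag[k-1][0] + 1 = k
      have hsm : PySem.List.pyGetD (pvDiagB n (k - 1)) 0 0 = k - 1 := by
        rw [pvDiagB_up n (k - 1) (by omega),
          PySem.List.pyGetD_map_pyRange_of_nonneg _ _ _ _ (by omega) (by omega)]
        ring
      have hbuf : (PySem.List.pyRange 0 (k + 1) 1).foldl
          (fun b j => b ++ [PySem.List.pyGetD (pvDiagB n (k - 1)) 0 0 + 1 + j * (n - 1)]) []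
          = pvDiagB n k := by
        rw [pv_foldl_append_map, pvDiagB_up n k hup]
        simp only [List.nil_append]
        apply List.map_congr_left
        intro r _
        rw [hsm]; ring
      by_cases hpk : k + 1 = n
      · simp only [pvStepA, pvCs, hup, if_pos, if_neg (show ¬ k = 0 by omega), hprev,
          decide_eq_true_eq, hbuf]
        simp [hpk, Prod.mk.injEq]
        omega
      · simp only [pvStepA, pvCs, hup, if_neg (show ¬ k = 0 by omega), hprev,
          decide_eq_true_eq, if_true, hbuf]
        simp [show k + 1 ≤ n - 1 by omega, if_neg hpk]
    · -- direction down: smallest = diag[k-1][1] + 1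
      have hk3 : n ≤ k := by omega
      have hsm : PySem.List.pyGetD (pvDiagB n (k - 1)) 1 0 = (k - n + 1) * n + (n - 2) := by
        rw [pvDiagB_down n (k - 1) (by omega)]
        have h1 : PySem.List.pyGetD
            ((PySem.List.pyRange (k - 1 - n + 1) n 1).map (fun r => r * n + (k - 1 - r))) ((1:Nat) : Int) 0
            = (k - 1 - n + 1 + 1) * n + (k - 1 - (k - 1 - n + 1 + 1)) :=
          PySem.List.pyGetD_map_pyRange_one _ _ _ 1 _ (by omega)
        simpa using h1.trans (by ring)
      have hbuf : (PySem.List.pyRange 0 (2 * n - 1 - k) 1).foldl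
          (fun b j => b ++ [PySem.List.pyGetD (pvDiagB n (k - 1)) 1 0 + 1 + j * (n - 1)]) []
          = pvDiagB n k := by
        rw [pv_foldl_append_map, pvDiagB_down n k (by omega)]
        simp only [List.nil_append]
        rw [PySem.List.pyRange_one (0 : Int) (2 * n - 1 - k), PySem.List.pyRange_one (k - n + 1) n]
        rw [List.map_map, List.map_map]
        have hlen : (2 * n - 1 - k - 0).toNat = (n - (k - n + 1)).toNat := by omega
        rw [hlen]
        apply List.map_congr_left
        intro j _
        simp only [Function.comp]
        rw [hsm]; ring
      simp only [pvStepA, pvCs, if_neg (show ¬ k = 0 by omega), hprev, if_neg hup,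
        decide_eq_false_iff_not.mpr hup, Bool.false_eq_true, if_false, hbuf]
      simp [Prod.mk.injEq, show ¬ k + 1 ≤ n - 1 by omega]
      omega

-- ===== VERDICT (by name: the statement is the Claim_ definition above) =====
theorem generate_diag_indices_spec : Claim_equal_generate_diag_indices := by
  intro n _
  unfold Spec_generate_diag_indices
  show generate_diag_indices n = generate_diag_indices_alt n
  rcases lt_or_ge n 1 with h | h
  · -- n ≤ 0: both ranges are empty
    unfold generate_diag_indices
    rw [pvAlt_eq, PySem.List.pyRange_one_eq_nil (by omega), PySem.List.pyRange_one_eq_nil (by omega)]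
    rfl
  · rcases eq_or_lt_of_le h with h1 | h2
    · subst n; decide
    · have hn : 2 ≤ n := by omega
      unfold generate_diag_indices
      rw [pvAlt_eq, show n + (n - 1) = 2 * n - 1 from by ring,
        pv_inv n hn (2 * n - 1) (by omega) (by omega)]
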